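-- pv_equiv track=rewrite | github.com/SantiagoOrtega22/Proyecto-Scheduler-Autoadaptativo-H-brido-CPU-GPU-usando-ML | benchmark_runner.py | fft_radix_class
-- ===== SOURCE A (Python) =====
-- def fft_radix_class(dims):
--     def is_pow2(n):
--         return n > 0 and (n & (n - 1)) == 0
--
--     def is_smooth_235(n):
--         if n <= 0:
--             return False
--         for p in (2, 3, 5):
--             while n % p == 0:
--                 n //= p
--         return n == 1
--
--     if all(is_pow2(d) for d in dims):
--         return "pow2"
--     if all(is_smooth_235(d) for d in dims):
--         return "smooth235"
--     return "other"
-- ===== SOURCE B (Python) =====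
-- def fft_radix_class(dims):
--     def rank(n):
--         # 0 = power of two, 1 = 2-3-5-smooth but not a power of two, 2 = neither
--         if n <= 0:
--             return 2
--         while n % 2 == 0:
--             n //= 2
--         if n == 1:
--             return 0
--         while n % 3 == 0:
--             n //= 3
--         while n % 5 == 0:
--             n //= 5
--         return 1 if n == 1 else 2
--     worst = max((rank(d) for d in dims), default=0)
--     return ("pow2", "smooth235", "other")[worst]
-- ===== Notes on version B (the rewrite author's own statement) =====
-- stated objective: alternative
-- what changed: A runs two whole-list all()-scans with two boolean predicates (a bit-trick pow2 test, then a separate 2-3-5 stripping test that redoes the factor-2 work); B classifies each dim once into a ternary severity rank (power of two detected by stripping 2s, then 3s/5s only if needed), takes the max rank over the list and indexes a tuple of labels.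
import Mathlib
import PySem

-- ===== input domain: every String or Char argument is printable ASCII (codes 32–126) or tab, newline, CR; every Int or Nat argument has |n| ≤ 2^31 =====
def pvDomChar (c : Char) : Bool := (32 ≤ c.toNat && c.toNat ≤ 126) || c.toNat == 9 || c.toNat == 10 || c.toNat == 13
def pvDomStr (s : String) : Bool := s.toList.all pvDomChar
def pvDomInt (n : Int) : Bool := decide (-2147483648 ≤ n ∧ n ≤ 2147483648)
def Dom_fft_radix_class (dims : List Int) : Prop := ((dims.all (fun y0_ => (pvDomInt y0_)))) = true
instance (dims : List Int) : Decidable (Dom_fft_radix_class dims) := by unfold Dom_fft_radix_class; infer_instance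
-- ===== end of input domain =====

-- B replaces A's two all()-scans (bit-trick pow2 test + separate 2-3-5 stripping test) by a per-element
-- ternary severity rank (pow2 via stripping 2s) whose maximum over the list selects the label (alternative, same cost).


-- ===== PORT A =====
-- n > 0 and (n & (n - 1)) == 0
def pvIsPow2 (n : Int) : Bool := decide (0 < n) && decide (Int.land n (n - 1) = 0)

-- the 'while n % p == 0: n //= p' loop (shared by both Pythons, verbatim); only reached with
-- n > 0, where Python's // is exact Nat division
def pvStrip (p : Nat) (n : Nat) : Nat :=
  if h : 2 ≤ p ∧ 0 < n ∧ n % p = 0 then pvStrip p (n / p) else n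
termination_by n
decreasing_by exact Nat.div_lt_self h.2.1 (by omega)

def pvIsSmooth235 (n : Int) : Bool :=
  if n ≤ 0 then false
  else decide (pvStrip 5 (pvStrip 3 (pvStrip 2 n.toNat)) = 1)

def fft_radix_class (dims : List Int) : String :=
  if dims.all (fun d => pvIsPow2 d) then "pow2"
  else if dims.all (fun d => pvIsSmooth235 d) then "smooth235"
  else "other"

-- ===== PORT B =====
-- 0 = power of two (all 2s stripped leaves 1), 1 = 2-3-5-smooth only, 2 = neither
def pvRank (n : Int) : Nat :=
  if n ≤ 0 then 2
  else
    let m := pvStrip 2 n.toNat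
    if m = 1 then 0
    else if pvStrip 5 (pvStrip 3 m) = 1 then 1 else 2

-- max(gen, default=0) over the ranks, then the tuple indexing ("pow2","smooth235","other")[worst]
-- written as the explicit three-way branch
def fft_radix_class_alt (dims : List Int) : String :=
  let worst := (dims.map pvRank).foldl Nat.max 0
  if worst = 0 then "pow2" else if worst = 1 then "smooth235" else "other"

-- ===== PRECONDITION & SPEC =====
def Spec_fft_radix_class (dims : List Int) (out : String) : Prop := out = fft_radix_class_alt dims
instance (dims : List Int) (out : String) : Decidable (Spec_fft_radix_class dims out) := by unfold Spec_fft_radix_class; infer_instance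

-- ===== CLAIM =====
def Claim_equal_fft_radix_class : Prop := ∀ (dims : List Int), Dom_fft_radix_class dims → Spec_fft_radix_class dims (fft_radix_class dims)

-- ===== LEMMAS AND PROOFS =====
theorem pvStrip_one (p : Nat) (hp : 2 ≤ p) : pvStrip p 1 = 1 := by
  rw [pvStrip]
  simp
  omega

-- the recurrence (2a) &&& (2a - 1) = 2 * (a &&& (a - 1)) for a ≥ 1
theorem land_two_mul_pred (a : Nat) (ha : 0 < a) :
    (2 * a) &&& (2 * a - 1) = 2 * (a &&& (a - 1)) := by
  apply Nat.eq_of_testBit_eq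
  intro i
  cases i with
  | zero =>
      simp [Nat.testBit_zero]
  | succ j =>
      rw [Nat.testBit_land, Nat.testBit_succ, Nat.testBit_succ, Nat.testBit_succ]
      have h1 : 2 * a / 2 = a := by omega
      have h2 : (2 * a - 1) / 2 = a - 1 := by omega
      have h3 : 2 * (a &&& (a - 1)) / 2 = a &&& (a - 1) := by omega
      rw [h1, h2, h3, Nat.testBit_land]

-- for odd m, m &&& (m - 1) = m - 1
theorem land_pred_odd (m : Nat) (hm : m % 2 = 1) : m &&& (m - 1) = m - 1 := by
  apply Nat.eq_of_testBit_eq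
  intro i
  cases i with
  | zero =>
      simp [Nat.testBit_zero]
      omega
  | succ j =>
      rw [Nat.testBit_land, Nat.testBit_succ, Nat.testBit_succ]
      have h : m / 2 = (m - 1) / 2 := by omega
      rw [h, Bool.and_self]

-- the bit trick equals the strip-2 test on positive naturals
theorem land_pred_eq_strip2 (m : Nat) (hm : 0 < m) :
    (m &&& (m - 1) = 0) ↔ pvStrip 2 m = 1 := by
  induction m using Nat.strong_induction_on with
  | _ m ih =>
    rcases Nat.even_or_odd m with ⟨a, ha⟩ | hodd
    · -- m even
      have ha' : 0 < a := by omega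
      have hm2 : m = 2 * a := by omega
      subst hm2
      rw [land_two_mul_pred a ha']
      rw [pvStrip]
      have hc : 2 ≤ 2 ∧ 0 < 2 * a ∧ 2 * a % 2 = 0 := by omega
      rw [dif_pos hc]
      have hdiv : 2 * a / 2 = a := by omega
      rw [hdiv]
      rw [← ih a (by omega) ha']
      omega
    · -- m odd
      have hm1 : m % 2 = 1 := Nat.odd_iff.mp hodd
      rw [land_pred_odd m hm1]
      rw [pvStrip]
      have hc : ¬ (2 ≤ 2 ∧ 0 < m ∧ m % 2 = 0) := by omega
      rw [dif_neg hc]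
      omega

-- rank 0 ↔ A's pow2 predicate
theorem pvRank_zero_iff (n : Int) : pvRank n = 0 ↔ pvIsPow2 n = true := by
  unfold pvRank pvIsPow2
  by_cases h : n ≤ 0
  · simp [h]
  · have hpos : 0 < n := by omega
    have hmpos : 0 < n.toNat := by omega
    obtain ⟨m, hm⟩ : ∃ m : Nat, n = (m : Int) := ⟨n.toNat, by omega⟩
    subst hm
    have hland : Int.land (m : Int) ((m : Int) - 1) = ((m &&& (m - 1) : Nat) : Int) := by
      obtain ⟨k, rfl⟩ : ∃ k : Nat, m = k + 1 := ⟨m - 1, by omega⟩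
      have : ((k : Int) + 1) - 1 = (k : Int) := by ring
      push_cast
      rw [this]
      rfl
    simp only [h, if_false, hpos, decide_true, Bool.true_and, hland]
    rw [Int.toNat_natCast]
    by_cases hs : pvStrip 2 m = 1
    · simp [hs, (land_pred_eq_strip2 m (by omega)).mpr hs]
    · have hne : m &&& (m - 1) ≠ 0 := fun hc => hs ((land_pred_eq_strip2 m (by omega)).mp hc)
      rw [if_neg hs]
      constructor
      · intro h'
        exfalso
        split at h' <;> omega
      · intro h'
        exact absurd (by exact_mod_cast of_decide_eq_true h') hne

-- rank ≤ 1 ↔ A's smooth-235 predicate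
theorem pvRank_le_one_iff (n : Int) : pvRank n ≤ 1 ↔ pvIsSmooth235 n = true := by
  unfold pvRank pvIsSmooth235
  by_cases h : n ≤ 0
  · simp [h]
  · simp only [h, if_false]
    by_cases h1 : pvStrip 2 n.toNat = 1
    · simp [h1, pvStrip_one 3 (by omega), pvStrip_one 5 (by omega)]
    · by_cases h2 : pvStrip 5 (pvStrip 3 (pvStrip 2 n.toNat)) = 1 <;> simp [h1, h2]

theorem foldl_max_le_iff (l : List Nat) (acc k : Nat) :
    l.foldl Nat.max acc ≤ k ↔ acc ≤ k ∧ ∀ x ∈ l, x ≤ k := by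
  induction l generalizing acc with
  | nil => simp
  | cons y ys ih =>
    simp only [List.foldl, ih, Nat.max_le, List.mem_cons]
    constructor
    · rintro ⟨⟨h1, h2⟩, h3⟩
      exact ⟨h1, fun x hx => hx.elim (fun e => e ▸ h2) (h3 x)⟩
    · rintro ⟨h1, h2⟩
      exact ⟨⟨h1, h2 y (Or.inl rfl)⟩, fun x hx => h2 x (Or.inr hx)⟩

-- ===== VERDICT =====
theorem fft_radix_class_spec : Claim_equal_fft_radix_class := by
  intro dims _
  unfold Spec_fft_radix_class fft_radix_class fft_radix_class_alt
  set worst := (dims.map pvRank).foldl Nat.max 0 with hw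
  have hle : ∀ k, worst ≤ k ↔ ∀ d ∈ dims, pvRank d ≤ k := by
    intro k
    rw [hw, foldl_max_le_iff]
    simp
  by_cases hp : ∀ d ∈ dims, pvIsPow2 d = true
  · have hA : dims.all (fun d => pvIsPow2 d) = true := by
      simp only [List.all_eq_true]; exact hp
    have h0 : worst = 0 := by
      have := (hle 0).mpr (fun d hd => by rw [Nat.le_zero, pvRank_zero_iff]; exact hp d hd)
      omega
    rw [hA, if_pos rfl, if_pos h0]
  · have hA : ¬ (dims.all (fun d => pvIsPow2 d) = true) := by
      simpa only [List.all_eq_true] using hp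
    have hw0 : worst ≠ 0 := by
      intro h0
      exact hp (fun d hd => (pvRank_zero_iff d).mp (by have := (hle 0).mp (by omega) d hd; omega))
    rw [if_neg hA, if_neg hw0]
    by_cases hs : ∀ d ∈ dims, pvIsSmooth235 d = true
    · have hS : dims.all (fun d => pvIsSmooth235 d) = true := by
        simp only [List.all_eq_true]; exact hs
      have h1 : worst = 1 := by
        have := (hle 1).mpr (fun d hd => (pvRank_le_one_iff d).mpr (hs d hd))
        omega
      rw [hS, if_pos rfl, if_pos h1]
    · have hS : ¬ (dims.all (fun d => pvIsSmooth235 d) = true) := by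
        simpa only [List.all_eq_true] using hs
      have hw1 : ¬ worst ≤ 1 := by
        intro h1
        exact hs (fun d hd => (pvRank_le_one_iff d).mp ((hle 1).mp h1 d hd))
      rw [if_neg hS, if_neg (by omega)]
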